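-- pv_equiv track=rewrite | github.com/Hyperbean18/find-cdn-servers | utils/pick-cdn-domains.py | get_rank_ranges
-- ===== SOURCE A (Python) =====
-- def get_rank_ranges(dom_info: dict[int, dict[str, set[str]]]
--                     ) -> dict[str, tuple[int, int]]:
--     """find the highest and lowest rank of web sites associated with
--     each cdn domain.
--     """
--     rank_ranges = {}
--
--     for rank in dom_info:
--         for cdn in dom_info[rank]:
--             for dom in dom_info[rank][cdn]:
--                 if dom not in rank_ranges:
--                     hi_rank, lo_rank = rank, rank
--                 else:
--                     hi_rank, lo_rank = rank_ranges[dom]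
--                     if rank < hi_rank:
--                         hi_rank = rank
--                     elif rank > lo_rank:
--                         lo_rank = rank
--
--                 rank_ranges[dom] = hi_rank, lo_rank
--
--     return rank_ranges
-- ===== SOURCE B (Python) =====
-- def get_rank_ranges(dom_info):
--     """Group-then-reduce: collect every rank seen per cdn domain (domains in
--     first-appearance order), then take (min, max) of each group."""
--     groups = {}
--     for rank, cdns in dom_info.items():
--         for doms in cdns.values():
--             for dom in doms:
--                 groups.setdefault(dom, []).append(rank)
--     return {dom: (min(ranks), max(ranks)) for dom, ranks in groups.items()}
-- ===== Notes on version B (the rewrite author's own statement) =====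
-- stated objective: simpler
-- what changed: Replaces the incremental running-(min,max) dict updates with a group-then-reduce decomposition: one pass collects the list of ranks per domain (first-appearance order), a second pass maps each group to (min, max).
import Mathlib
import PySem

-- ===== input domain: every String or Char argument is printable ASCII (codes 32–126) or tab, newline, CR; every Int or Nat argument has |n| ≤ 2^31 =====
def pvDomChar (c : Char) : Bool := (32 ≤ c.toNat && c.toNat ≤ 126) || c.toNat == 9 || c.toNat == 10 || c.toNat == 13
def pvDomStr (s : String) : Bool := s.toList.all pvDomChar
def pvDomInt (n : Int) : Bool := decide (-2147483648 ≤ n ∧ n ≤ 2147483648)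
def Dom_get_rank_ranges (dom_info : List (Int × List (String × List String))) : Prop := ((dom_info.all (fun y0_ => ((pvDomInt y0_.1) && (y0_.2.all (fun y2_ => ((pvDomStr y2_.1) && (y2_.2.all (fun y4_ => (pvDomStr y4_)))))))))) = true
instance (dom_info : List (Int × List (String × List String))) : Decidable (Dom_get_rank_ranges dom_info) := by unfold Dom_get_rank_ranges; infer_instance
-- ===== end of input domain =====

-- B replaces A's incremental running-(min,max) updates by a group-then-reduce
-- decomposition (collect all ranks per domain, then map each group to (min, max)); simpler.

-- ===== PORT A =====
-- literal transliteration of A: triple nested loop keeping a running (hi, lo) per domain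
def get_rank_ranges (dom_info : List (Int × List (String × List String))) : List (String × Int × Int) :=
  (dom_info.foldl (fun rr p =>
    p.2.foldl (fun rr q =>
      q.2.foldl (fun rr dom =>
        let hl : Int × Int :=
          if rr.contains dom = false then (p.1, p.1)
          else
            -- rank_ranges[dom]: key is present here, so the default never fires
            let hl0 := rr.getD dom (0, 0)
            if p.1 < hl0.1 then (p.1, hl0.2)
            else if p.1 > hl0.2 then (hl0.1, p.1)
            else hl0
        rr.insert dom hl) rr) rr)
    PySem.Dict.empty).items

-- ===== PORT B =====
-- literal transliteration of B: pass 1 groups ranks per domain, pass 2 reduces each group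
def get_rank_ranges_alt (dom_info : List (Int × List (String × List String))) : List (String × Int × Int) :=
  let groups : PySem.Dict String (List Int) :=
    dom_info.foldl (fun g p =>
      p.2.foldl (fun g q =>
        q.2.foldl (fun g dom => g.modify dom [] (· ++ [p.1])) g) g)
      PySem.Dict.empty
  -- min(ranks)/max(ranks): every group is nonempty, so the .getD 0 totalizers never fire
  groups.items.map (fun pr =>
    (pr.1, ((PySem.List.min? pr.2 (fun x => x)).getD 0,
            (PySem.List.max? pr.2 (fun x => x)).getD 0)))

-- ===== PRECONDITION & SPEC =====
def Spec_get_rank_ranges (dom_info : List (Int × List (String × List String))) (out : List (String × Int × Int)) : Prop := out = get_rank_ranges_alt dom_info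
instance (dom_info : List (Int × List (String × List String))) (out : List (String × Int × Int)) : Decidable (Spec_get_rank_ranges dom_info out) := by unfold Spec_get_rank_ranges; infer_instance

-- ===== CLAIM (what is proved, stated in full; the proofs are below) =====
def Claim_equal_get_rank_ranges : Prop := ∀ (dom_info : List (Int × List (String × List String))), Dom_get_rank_ranges dom_info → Spec_get_rank_ranges dom_info (get_rank_ranges dom_info)

-- ===== LEMMAS AND PROOFS =====

-- the flattened (domain, rank) occurrence list both programs traverse
def pvFlat (dom_info : List (Int × List (String × List String))) : List (String × Int) :=
  dom_info.flatMap (fun p => p.2.flatMap (fun q => q.2.map (fun d => (d, p.1))))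

def pvStepA (rr : PySem.Dict String (Int × Int)) (pr : String × Int) : PySem.Dict String (Int × Int) :=
  rr.insert pr.1
    (if rr.contains pr.1 = false then (pr.2, pr.2)
     else
       let hl0 := rr.getD pr.1 (0, 0)
       if pr.2 < hl0.1 then (pr.2, hl0.2)
       else if pr.2 > hl0.2 then (hl0.1, pr.2)
       else hl0)

def pvStepB (g : PySem.Dict String (List Int)) (pr : String × Int) : PySem.Dict String (List Int) :=
  g.modify pr.1 [] (· ++ [pr.2])

def pvUpd (hl : Int × Int) (r : Int) : Int × Int :=
  if r < hl.1 then (r, hl.2) else if r > hl.2 then (hl.1, r) else hl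

theorem pv_foldl_flatMap {α β γ : Type} (g : α → List β) (f : γ → β → γ) (l : List α) (b : γ) :
    (l.flatMap g).foldl f b = l.foldl (fun b a => (g a).foldl f b) b := by
  induction l generalizing b with
  | nil => rfl
  | cons x t ih => simp [List.flatMap_cons, List.foldl_append, ih]

 
 
 
 
theorem pvA_eq_flat (dom_info : List (Int × List (String × List String))) :
    get_rank_ranges dom_info = ((pvFlat dom_info).foldl pvStepA PySem.Dict.empty).items := by
  unfold get_rank_ranges pvFlat
  rw [pv_foldl_flatMap]
  congr 1
  apply PySem.List.foldl_congr_mem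
  intro rr p _
  rw [pv_foldl_flatMap]
  apply PySem.List.foldl_congr_mem
  intro rr q _
  rw [List.foldl_map]
  rfl

theorem pvB_eq_flat (dom_info : List (Int × List (String × List String))) :
    get_rank_ranges_alt dom_info =
      ((pvFlat dom_info).foldl pvStepB PySem.Dict.empty).items.map (fun pr =>
        (pr.1, ((PySem.List.min? pr.2 (fun x => x)).getD 0,
                (PySem.List.max? pr.2 (fun x => x)).getD 0))) := by
  unfold get_rank_ranges_alt pvFlat
  dsimp only
  rw [pv_foldl_flatMap]
  congr 2
  apply PySem.List.foldl_congr_mem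
  intro g p _
  rw [pv_foldl_flatMap]
  apply PySem.List.foldl_congr_mem
  intro g q _
  rw [List.foldl_map]
  rfl
theorem pvStepA_get? (d : PySem.Dict String (Int × Int)) (p : String × Int) (k : String) :
    (pvStepA d p).get? k = if k = p.1 then
        some (match d.get? p.1 with | none => (p.2, p.2) | some hl => pvUpd hl p.2)
      else d.get? k := by
  unfold pvStepA
  rw [PySem.Dict.get?_insert]
  congr 1
  rw [PySem.Dict.contains_eq_isSome_get?, PySem.Dict.getD_eq_get?_getD]
  cases h : d.get? p.1 with
  | none => simp
  | some hl => simp [pvUpd]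

theorem pvA_get? (l : List (String × Int)) (d : PySem.Dict String (Int × Int)) (k : String) :
    (l.foldl pvStepA d).get? k =
      ((l.filter (fun p => p.1 == k)).map (·.2)).foldl
        (fun o r => some (match o with | none => (r, r) | some hl => pvUpd hl r)) (d.get? k) := by
  induction l generalizing d with
  | nil => rfl
  | cons p t ih =>
    rw [List.foldl_cons, ih]
    by_cases h : p.1 = k
    · rw [List.filter_cons_of_pos (by simp [h]), List.map_cons, List.foldl_cons,
        pvStepA_get?, if_pos h.symm, h]
    · rw [List.filter_cons_of_neg (by simp [h]), pvStepA_get?, if_neg (fun hk => h hk.symm)]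

theorem pvUpd_minmax (t : List Int) (hl : Int × Int) (h : hl.1 ≤ hl.2) :
    t.foldl pvUpd hl = (t.foldl min hl.1, t.foldl max hl.2) := by
  induction t generalizing hl with
  | nil => rfl
  | cons r t ih =>
    rw [List.foldl_cons, List.foldl_cons, List.foldl_cons]
    have : pvUpd hl r = (min hl.1 r, max hl.2 r) := by
      unfold pvUpd
      obtain ⟨a, b⟩ := hl
      simp only at h ⊢
      split_ifs with h1 h2 <;> simp <;> omega
    rw [this]
    exact ih _ (by dsimp only; omega)
theorem pv_foldl_some (t : List Int) (hl : Int × Int) :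
    t.foldl (fun o r => some (match o with | none => (r, r) | some hl => pvUpd hl r)) (some hl)
      = some (t.foldl pvUpd hl) := by
  induction t generalizing hl with
  | nil => rfl
  | cons r t ih => rw [List.foldl_cons, List.foldl_cons, ih]

theorem pv_main (dom_info : List (Int × List (String × List String))) :
    get_rank_ranges dom_info = get_rank_ranges_alt dom_info := by
  rw [pvA_eq_flat, pvB_eq_flat]
  set l := pvFlat dom_info with hl
  have hndA : (l.foldl pvStepA PySem.Dict.empty).keys.Nodup := by
    exact PySem.Dict.nodup_keys_foldl_insert_key l (fun p => p.1) _ _ PySem.Dict.nodup_keys_empty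
  have hndG : (l.foldl pvStepB PySem.Dict.empty).keys.Nodup := by
    exact PySem.Dict.nodup_keys_foldl_modify_key l (fun p => p.1) [] _ _ PySem.Dict.nodup_keys_empty
  have hkA : (l.foldl pvStepA PySem.Dict.empty).keys = PySem.Set.ofList (l.map (·.1)) := by
    have := PySem.Dict.keys_foldl_insert_key (l := l) (key := fun p => p.1)
      (f := fun rr p =>
        (if rr.contains p.1 = false then (p.2, p.2)
         else
           let hl0 := rr.getD p.1 (0, 0)
           if p.2 < hl0.1 then (p.2, hl0.2)
           else if p.2 > hl0.2 then (hl0.1, p.2)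
           else hl0)) (d := PySem.Dict.empty)
    rw [show (fun (d : PySem.Dict String (Int × Int)) (x : String × Int) => d.insert x.1 _) = pvStepA from rfl] at this
    rw [this, PySem.Dict.keys_empty, PySem.Set.update_nil_left]
  have hkG : (l.foldl pvStepB PySem.Dict.empty).keys = PySem.Set.ofList (l.map (·.1)) := by
    have := PySem.Dict.keys_foldl_modify_key (l := l) (key := fun p => p.1)
      (d0 := ([] : List Int)) (f := fun _ p => (· ++ [p.2])) (d := PySem.Dict.empty)
    rw [show (fun (d : PySem.Dict String (List Int)) (x : String × Int) => d.modify x.1 [] _) = pvStepB from rfl] at this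
    rw [this, PySem.Dict.keys_empty, PySem.Set.update_nil_left]
  rw [PySem.Dict.items_eq_map_keys _ hndA (0, 0), PySem.Dict.items_eq_map_keys _ hndG []]
  rw [List.map_map, hkA, hkG]
  apply List.map_congr_left
  intro k hk
  have hmem : ∃ p ∈ l, p.1 = k := by
    have := (PySem.Set.mem_ofList (l.map (·.1)) k).mp hk
    simpa using this
  have hG : (l.foldl pvStepB PySem.Dict.empty).getD k [] =
      (l.filter (fun p => p.1 == k)).map (·.2) := by
    have := PySem.Dict.getD_foldl_modify_append (l := l) (d := PySem.Dict.empty) (c := k)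
    rw [show (fun (d : PySem.Dict String (List Int)) (p : String × Int) => d.modify p.1 [] (· ++ [p.2])) = pvStepB from rfl] at this
    rw [this, PySem.Dict.getD_empty]
    simp
  have hne : (l.filter (fun p => p.1 == k)).map (·.2) ≠ [] := by
    obtain ⟨p, hp, hpk⟩ := hmem
    simp only [ne_eq, List.map_eq_nil_iff, List.filter_eq_nil_iff]
    intro hall
    exact (hall p hp) (by simp [hpk])
  obtain ⟨x, t, hxt⟩ := List.exists_cons_of_ne_nil hne
  have hA : (l.foldl pvStepA PySem.Dict.empty).getD k (0, 0) = (t.foldl min x, t.foldl max x) := by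
    rw [PySem.Dict.getD_eq_get?_getD, pvA_get?, PySem.Dict.get?_empty, hxt,
      List.foldl_cons, pv_foldl_some, pvUpd_minmax t (x, x) (le_refl x)]
    rfl
  have hB : ((PySem.List.min? ((l.foldl pvStepB PySem.Dict.empty).getD k []) (fun x => x)).getD 0,
             (PySem.List.max? ((l.foldl pvStepB PySem.Dict.empty).getD k []) (fun x => x)).getD 0)
        = (t.foldl min x, t.foldl max x) := by
    rw [hG, hxt, PySem.List.min?_id_cons, PySem.List.max?_id_cons]
    rfl
  simp only [Function.comp]
  rw [hA, ← hB]

-- ===== VERDICT (by name: the statement is the Claim_ definition above) =====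
theorem get_rank_ranges_spec : Claim_equal_get_rank_ranges := by
  intro dom_info _
  unfold Spec_get_rank_ranges
  exact pv_main dom_info
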